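-- pv_equiv track=rewrite | github.com/cyxfff/icache_test | test/runner.py | extract_memory_layout_blocks
-- ===== SOURCE A (Python) =====
-- def extract_memory_layout_blocks(raw_output):
--     blocks = []
--     current = []
--     capturing = False
--     for line in raw_output.splitlines():
--         if line.strip() == "===== memory layout =====":
--             if current:
--                 blocks.append(current)
--             current = [line]
--             capturing = True
--             continue
--         if not capturing:
--             continue
--         if line.startswith("iters=") or line.startswith("data_region ") or line.startswith("code_region "):
--             current.append(line)
--             continue
--         blocks.append(current)
--         current = []
--         capturing = False
--     if current:
--         blocks.append(current)
--     return blocks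
-- ===== SOURCE B (Python) =====
-- MARKER = "===== memory layout ====="
--
-- def _is_cont(line):
--     return (line.startswith("iters=") or line.startswith("data_region ")
--             or line.startswith("code_region "))
--
-- def extract_memory_layout_blocks(raw_output):
--     lines = raw_output.splitlines()
--     n = len(lines)
--     blocks = []
--     i = 0
--     while i < n:
--         if lines[i].strip() == MARKER:
--             block = [lines[i]]
--             i += 1
--             while i < n and lines[i].strip() != MARKER and _is_cont(lines[i]):
--                 block.append(lines[i])
--                 i += 1
--             blocks.append(block)
--         else:
--             i += 1
--     return blocks
-- ===== Notes on version B (the rewrite author's own statement) =====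
-- stated objective: alternative
-- what changed: Replaces the flag-and-accumulator single pass (capturing/current state threaded through every line) with an index-cursor walk that, at each marker line, consumes the following continuation lines in a nested inner loop and emits the block immediately, dropping the boolean state and deferred flushes.
import Mathlib
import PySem

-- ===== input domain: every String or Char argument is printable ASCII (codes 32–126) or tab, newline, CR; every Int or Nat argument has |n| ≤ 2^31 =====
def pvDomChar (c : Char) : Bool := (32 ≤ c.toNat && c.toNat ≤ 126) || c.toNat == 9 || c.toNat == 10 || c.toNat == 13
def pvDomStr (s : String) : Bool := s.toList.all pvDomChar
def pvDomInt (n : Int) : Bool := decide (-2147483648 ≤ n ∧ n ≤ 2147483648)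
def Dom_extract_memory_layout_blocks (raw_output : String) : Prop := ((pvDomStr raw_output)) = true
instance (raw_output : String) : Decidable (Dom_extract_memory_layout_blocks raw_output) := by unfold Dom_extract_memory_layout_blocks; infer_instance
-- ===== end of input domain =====

-- B replaces A's capturing-flag single pass by an index-cursor walk with a nested
-- inner loop over continuation lines (alternative decomposition; same cost).


-- ===== PORT A =====
-- line.strip() == "===== memory layout ====="
def emlMarker (l : String) : Bool := PySem.Str.strip l == "===== memory layout ====="
-- line.startswith("iters=") or line.startswith("data_region ") or line.startswith("code_region ")
def emlCont (l : String) : Bool :=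
  PySem.Str.startswith l "iters=" || PySem.Str.startswith l "data_region " || PySem.Str.startswith l "code_region "

-- one iteration of A's for-loop over state (blocks, current, capturing)
def emlStepA (st : List (List String) × List String × Bool) (line : String) :
    List (List String) × List String × Bool :=
  let (blocks, current, capturing) := st
  if emlMarker line then
    ((if current ≠ [] then blocks ++ [current] else blocks), [line], true)
  else if !capturing then (blocks, current, capturing)
  else if emlCont line then (blocks, current ++ [line], capturing)
  else (blocks ++ [current], [], false)

def extract_memory_layout_blocks (raw_output : String) : List (List String) :=
  let st := (PySem.Str.splitlines raw_output).foldl emlStepA ([], [], false)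
  if st.2.1 ≠ [] then st.1 ++ [st.2.1] else st.1

-- ===== PORT B =====
-- inner while condition: lines[i].strip() != MARKER and _is_cont(lines[i])
def emlContB (l : String) : Bool := !(emlMarker l) && emlCont l

-- the index-cursor walk: at a marker line, consume continuation lines and emit the block
def emlGoB : List String → List (List String)
  | [] => []
  | l :: rest =>
    if emlMarker l then
      (l :: rest.takeWhile emlContB) :: emlGoB (rest.dropWhile emlContB)
    else emlGoB rest
termination_by ls => ls.length
decreasing_by
  · exact Nat.lt_succ_of_le (List.length_dropWhile_le _ _)
  · simp

def extract_memory_layout_blocks_alt (raw_output : String) : List (List String) :=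
  emlGoB (PySem.Str.splitlines raw_output)

-- ===== PRECONDITION & SPEC =====
def Spec_extract_memory_layout_blocks (raw_output : String) (out : List (List String)) : Prop := out = extract_memory_layout_blocks_alt raw_output
instance (raw_output : String) (out : List (List String)) : Decidable (Spec_extract_memory_layout_blocks raw_output out) := by unfold Spec_extract_memory_layout_blocks; infer_instance

-- ===== CLAIM (what is proved, stated in full; the proofs are below) =====
def Claim_equal_extract_memory_layout_blocks : Prop := ∀ (raw_output : String), Dom_extract_memory_layout_blocks raw_output → Spec_extract_memory_layout_blocks raw_output (extract_memory_layout_blocks raw_output)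

-- ===== LEMMAS AND PROOFS =====

-- the finish step of A (append the pending current block, if any)
def emlFinish (st : List (List String) × List String × Bool) : List (List String) :=
  if st.2.1 ≠ [] then st.1 ++ [st.2.1] else st.1

-- joint loop invariant: A's fold from a non-capturing empty-current state produces
-- blocks ++ emlGoB ls, and from a capturing state with pending block cur ≠ [] it
-- produces blocks ++ (cur extended by the continuation lines) :: the rest.
theorem emlInvariant (ls : List String) :
    (∀ blocks, emlFinish (ls.foldl emlStepA (blocks, [], false)) = blocks ++ emlGoB ls) ∧
    (∀ blocks cur, cur ≠ [] →
      emlFinish (ls.foldl emlStepA (blocks, cur, true)) =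
        blocks ++ (cur ++ ls.takeWhile emlContB) :: emlGoB (ls.dropWhile emlContB)) := by
  induction ls with
  | nil =>
    constructor
    · intro blocks; simp [emlFinish, emlGoB]
    · intro blocks cur hcur; simp [emlFinish, hcur, emlGoB]
  | cons l ls ih =>
    obtain ⟨ih0, ih1⟩ := ih
    constructor
    · intro blocks
      by_cases hm : emlMarker l
      · rw [List.foldl_cons]
        have h1 := ih1 blocks [l] (by simp)
        simp only [emlStepA, hm, ne_eq, not_true, reduceIte] at h1 ⊢
        rw [h1, emlGoB]
        simp [hm]
      · have hm' : emlMarker l = false := by simpa using hm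
        rw [List.foldl_cons]
        simp only [emlStepA, hm', Bool.false_eq_true, reduceIte, Bool.not_false]
        rw [ih0 blocks, emlGoB]
        simp [hm']
    · intro blocks cur hcur
      rw [List.foldl_cons]
      by_cases hm : emlMarker l
      · have h1 := ih1 (blocks ++ [cur]) [l] (by simp)
        simp only [emlStepA, hm, reduceIte, ne_eq, hcur, not_false_eq_true] at h1 ⊢
        rw [h1]
        have hc : emlContB l = false := by simp [emlContB, hm]
        rw [List.takeWhile_cons_of_neg (by simp [hc]), List.dropWhile_cons_of_neg (by simp [hc])]
        rw [emlGoB]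
        simp [hm]
      · have hm' : emlMarker l = false := by simpa using hm
        by_cases hk : emlCont l
        · have hc : emlContB l = true := by simp [emlContB, hm', hk]
          simp only [emlStepA, hm', hk, Bool.false_eq_true, reduceIte, Bool.not_true]
          rw [ih1 blocks (cur ++ [l]) (by simp)]
          rw [List.takeWhile_cons_of_pos (by simp [hc]), List.dropWhile_cons_of_pos (by simp [hc])]
          simp
        · have hk' : emlCont l = false := by simpa using hk
          have hc : emlContB l = false := by simp [emlContB, hk']
          simp only [emlStepA, hm', hk', Bool.false_eq_true, reduceIte, Bool.not_true]
          rw [ih0 (blocks ++ [cur])]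
          rw [List.takeWhile_cons_of_neg (by simp [hc]), List.dropWhile_cons_of_neg (by simp [hc])]
          rw [emlGoB]
          simp [hm']

-- ===== VERDICT (by name: the statement is the Claim_ definition above) =====
theorem extract_memory_layout_blocks_spec : Claim_equal_extract_memory_layout_blocks := by
  intro raw_output _
  unfold Spec_extract_memory_layout_blocks extract_memory_layout_blocks extract_memory_layout_blocks_alt
  have h := (emlInvariant (PySem.Str.splitlines raw_output)).1 []
  simpa [emlFinish] using h
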